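-- pv_equiv track=rewrite | github.com/kitealert7-source/Trade-Scan- | tools/engine_resolver.py | _engine_satisfies
-- ===== SOURCE A (Python) =====
-- def _engine_satisfies(engine_caps: set, required: set, compat_map: dict) -> bool:
--     """
--     Required ⊆ engine_caps, allowing explicit compatibility mapping.
--
--     For each required token r: engine_caps must contain r directly, OR
--     contain some token e whose compatible_with list explicitly includes r.
--     """
--     for r in required:
--         if r in engine_caps:
--             continue
--         if any(r in compat_map.get(e, set()) for e in engine_caps):
--             continue
--         return False
--     return True
-- ===== SOURCE B (Python) =====
-- def _engine_satisfies(engine_caps: set, required: set, compat_map: dict) -> bool: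
--     remaining = set(required) - set(engine_caps)
--     for e in engine_caps:
--         if not remaining:
--             break
--         remaining.difference_update(compat_map.get(e, ()))
--     return not remaining
-- ===== Notes on version B (the rewrite author's own statement) =====
-- stated objective: alternative
-- what changed: B inverts the traversal: instead of scanning engine_caps per required token, it builds remaining = required - engine_caps once and whittles it down by one difference_update per engine cap, breaking early when empty.
import Mathlib
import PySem

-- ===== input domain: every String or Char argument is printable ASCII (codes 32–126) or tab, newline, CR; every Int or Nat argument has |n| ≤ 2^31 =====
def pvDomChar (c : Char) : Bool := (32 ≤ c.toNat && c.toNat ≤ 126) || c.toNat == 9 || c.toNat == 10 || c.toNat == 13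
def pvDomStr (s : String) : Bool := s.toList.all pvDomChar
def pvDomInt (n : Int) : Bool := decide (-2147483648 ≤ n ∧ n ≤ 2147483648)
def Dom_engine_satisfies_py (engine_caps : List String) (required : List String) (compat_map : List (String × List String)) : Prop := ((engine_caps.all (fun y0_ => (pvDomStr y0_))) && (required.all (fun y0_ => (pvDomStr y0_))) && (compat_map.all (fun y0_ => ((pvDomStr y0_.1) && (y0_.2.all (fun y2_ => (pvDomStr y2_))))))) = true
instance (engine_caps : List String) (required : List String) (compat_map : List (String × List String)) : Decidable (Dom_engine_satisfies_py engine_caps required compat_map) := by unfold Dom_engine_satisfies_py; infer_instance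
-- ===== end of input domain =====

-- B replaces A's per-required-token scan of engine_caps by one shrinking 'remaining' set
-- whittled down per engine cap (alternative decomposition; return value proved equal).

-- ===== PORT A =====
-- the 'for r in required' loop with early 'return False'
def pvALoop (engine_caps : List String) (compat_map : List (String × List String)) : List String → Bool
  | [] => true
  | r :: rest =>
    if PySem.Set.contains engine_caps r then pvALoop engine_caps compat_map rest
    else if engine_caps.any (fun e => ((PySem.Dict.mk compat_map).getD e []).contains r) then
      pvALoop engine_caps compat_map rest
    else false

def engine_satisfies_py (engine_caps : List String) (required : List String) (compat_map : List (String × List String)) : Bool :=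
  pvALoop engine_caps compat_map required

-- ===== PORT B =====
-- the 'for e in engine_caps' loop with early break on empty remaining
def pvBLoop (compat_map : List (String × List String)) : List String → PySem.Set String → PySem.Set String
  | [], remaining => remaining
  | e :: es, remaining =>
    if remaining.isEmpty then remaining
    else pvBLoop compat_map es
      (remaining.filter (fun r => !((PySem.Dict.mk compat_map).getD e []).contains r))

def engine_satisfies_py_alt (engine_caps : List String) (required : List String) (compat_map : List (String × List String)) : Bool :=
  let remaining : PySem.Set String :=
    PySem.Set.diff (PySem.Set.ofList required) (PySem.Set.ofList engine_caps)
  (pvBLoop compat_map engine_caps remaining).isEmpty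

-- ===== PRECONDITION & SPEC =====
def Spec_engine_satisfies_py (engine_caps : List String) (required : List String) (compat_map : List (String × List String)) (out : Bool) : Prop := out = engine_satisfies_py_alt engine_caps required compat_map
instance (engine_caps : List String) (required : List String) (compat_map : List (String × List String)) (out : Bool) : Decidable (Spec_engine_satisfies_py engine_caps required compat_map out) := by unfold Spec_engine_satisfies_py; infer_instance

-- ===== CLAIM (what is proved, stated in full; the proofs are below) =====
def Claim_equal_engine_satisfies_py : Prop := ∀ (engine_caps : List String) (required : List String) (compat_map : List (String × List String)), Dom_engine_satisfies_py engine_caps required compat_map → Spec_engine_satisfies_py engine_caps required compat_map (engine_satisfies_py engine_caps required compat_map)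

-- ===== LEMMAS AND PROOFS =====

-- A's loop is the 'all' of the per-token test
theorem pvALoop_eq_all (caps : List String) (cm : List (String × List String)) (req : List String) :
    pvALoop caps cm req =
      req.all (fun r => PySem.Set.contains caps r ||
        caps.any (fun e => ((PySem.Dict.mk cm).getD e []).contains r)) := by
  induction req with
  | nil => rfl
  | cons r rest ih =>
    simp only [pvALoop, List.all_cons]
    split_ifs with h1 h2 <;> simp_all

-- B's loop (with its early break) is a single filter over the caps
theorem pvBLoop_eq_filter (cm : List (String × List String)) (caps : List String) (rem : List String) :
    pvBLoop cm caps rem =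
      rem.filter (fun r => caps.all (fun e => !((PySem.Dict.mk cm).getD e []).contains r)) := by
  induction caps generalizing rem with
  | nil => simp [pvBLoop]
  | cons e es ih =>
    simp only [pvBLoop]
    split_ifs with h
    · rcases List.isEmpty_iff.mp h with rfl
      simp
    · rw [ih, List.filter_filter]
      simp [Bool.and_comm]

theorem engine_satisfies_py_eq (caps req : List String) (cm : List (String × List String)) :
    engine_satisfies_py caps req cm = engine_satisfies_py_alt caps req cm := by
  simp only [engine_satisfies_py, engine_satisfies_py_alt, pvALoop_eq_all, pvBLoop_eq_filter,
    PySem.Set.diff]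
  rw [List.filter_filter, Bool.eq_iff_iff, List.isEmpty_iff, List.filter_eq_nil_iff,
    List.all_eq_true]
  simp only [PySem.Set.mem_ofList]
  refine forall₂_congr fun r hr => ?_
  simp only [PySem.Set.contains, List.contains_eq_mem, Bool.or_eq_true, List.any_eq_true,
    decide_eq_true_eq, Bool.and_eq_true, Bool.not_eq_true', List.all_eq_true, not_and,
    decide_eq_false_iff_not, PySem.Set.mem_ofList]
  constructor
  · rintro (hc | ⟨e, he, hce⟩) hall
    · exact not_not_intro hc
    · exact absurd hce (hall e he)
  · intro h
    by_cases hc : r ∈ caps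
    · exact Or.inl hc
    · right
      by_contra hno
      push Not at hno
      exact hc (not_not.mp (h hno))

-- ===== VERDICT (by name: the statement is the Claim_ definition above) =====
theorem engine_satisfies_py_spec : Claim_equal_engine_satisfies_py := by
  intro caps req cm _
  exact engine_satisfies_py_eq caps req cm
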